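-- pv_equiv track=rewrite | github.com/networkdynamics/zenlib | src/zen/algorithms/community/slpa.py | listen
-- ===== SOURCE A (Python) =====
-- def listen(nodes):
-- 	# Listening rule for a node: select the most popular node
-- 	# spoken by the neighbors
--
-- 	current_max = nodes[0]
-- 	node_counts = {nodes[0]: 1}
-- 	for node in nodes[1:]:
-- 		if node in node_counts:
-- 			node_counts[node] += 1
-- 		else:
-- 			node_counts[node] = 1
--
-- 		if node_counts[node] > node_counts[current_max]:
-- 			current_max = node
--
-- 	return current_max
-- ===== SOURCE B (Python) =====
-- def listen(nodes):
--     # Two passes: count everything first, then return the first node whose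
--     # running count reaches the global maximum (same tiebreak as A).
--     counts = {}
--     for node in nodes:
--         counts[node] = counts.get(node, 0) + 1
--     m = max(counts.values())
--     running = {}
--     for node in nodes:
--         running[node] = running.get(node, 0) + 1
--         if running[node] == m:
--             return node
-- ===== Notes on version B (the rewrite author's own statement) =====
-- stated objective: alternative
-- what changed: A keeps a running arg-max while counting in one pass; B first builds a full frequency table, takes its maximum M, then a second scan returns the first element whose running count reaches M (same first-to-reach-max tiebreak).
import Mathlib
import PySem

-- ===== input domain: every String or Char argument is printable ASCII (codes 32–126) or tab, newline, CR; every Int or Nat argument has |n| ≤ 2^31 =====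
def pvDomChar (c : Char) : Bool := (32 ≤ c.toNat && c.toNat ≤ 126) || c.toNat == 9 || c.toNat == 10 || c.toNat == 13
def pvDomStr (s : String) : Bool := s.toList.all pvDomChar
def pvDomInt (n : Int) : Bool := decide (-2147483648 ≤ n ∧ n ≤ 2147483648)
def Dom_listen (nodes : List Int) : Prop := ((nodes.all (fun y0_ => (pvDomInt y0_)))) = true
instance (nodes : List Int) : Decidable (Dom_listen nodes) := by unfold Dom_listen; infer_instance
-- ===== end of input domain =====

-- B replaces A's single-pass running arg-max with a count-first/second-scan decomposition
-- (same first-to-reach-the-maximum tiebreak); objective: alternative, equal cost.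

-- ===== PORT A =====
-- A: one pass, dict of counts plus a running current_max updated on strict increase.
def listenLoopA (rest : List Int) (counts : PySem.Dict Int Int) (cur : Int) : Int :=
  match rest with
  | [] => cur
  | n :: t =>
    let counts' := if counts.contains n then counts.insert n (counts.getD n 0 + 1)
                   else counts.insert n 1
    listenLoopA t counts' (if counts'.getD n 0 > counts'.getD cur 0 then n else cur)

def listen (nodes : List Int) : Int :=
  match nodes with
  | [] => 0  -- Python raises IndexError on nodes[0]; excluded by Pre_listen
  | h :: t => listenLoopA t (PySem.Dict.empty.insert h 1) h

-- ===== PORT B =====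
-- B: first pass builds the full frequency table; second pass returns the first
-- node whose running count reaches the table's maximum.
def listenFindB (rest : List Int) (running : PySem.Dict Int Int) (m : Int) : Int :=
  match rest with
  | [] => 0  -- unreachable for the m computed by listen_alt: some node reaches m
  | n :: t =>
    let running' := running.insert n (running.getD n 0 + 1)
    if running'.getD n 0 = m then n else listenFindB t running' m

def listen_alt (nodes : List Int) : Int :=
  let counts := nodes.foldl (fun d x => d.insert x (d.getD x 0 + 1)) PySem.Dict.empty
  let m := (PySem.List.max? counts.values (fun y => y)).getD 0  -- max() raises on []; excluded by Pre_listen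
  listenFindB nodes PySem.Dict.empty m

-- ===== PRECONDITION & SPEC =====
-- Pre_ excludes only the empty list, on which A raises IndexError (and B ValueError).
def Pre_listen (nodes : List Int) : Prop := nodes ≠ []
instance (nodes : List Int) : Decidable (Pre_listen nodes) := by unfold Pre_listen; infer_instance
def pvWitness_listen : List Int := [1, 2, 2, 1]

def Spec_listen (nodes : List Int) (out : Int) : Prop := out = listen_alt nodes
instance (nodes : List Int) (out : Int) : Decidable (Spec_listen nodes out) := by unfold Spec_listen; infer_instance

-- ===== CLAIM (what is proved, stated in full; the proofs are below) =====
def Claim_equal_listen : Prop := ∀ (nodes : List Int), Dom_listen nodes → Pre_listen nodes → Spec_listen nodes (listen nodes)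

-- ===== LEMMAS AND PROOFS =====

-- abstract versions of the two loops, carrying the processed prefix instead of the dicts

def aAbs (p rest : List Int) (cur : Int) : Int :=
  match rest with
  | [] => cur
  | n :: t => aAbs (p ++ [n]) t (if (p ++ [n]).count n > (p ++ [n]).count cur then n else cur)

def frAbs (pre rest : List Int) (M : Nat) : Int :=
  match rest with
  | [] => 0
  | n :: t => if pre.count n + 1 = M then n else frAbs (pre ++ [n]) t M

-- sup of g over a list (with floor 0), used to state the maximal multiplicity
def supOn (g : Int → Nat) (l : List Int) : Nat := l.foldr (fun x m => max (g x) m) 0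

def mc (l : List Int) : Nat := supOn (fun x => l.count x) l

theorem supOn_cons (g : Int → Nat) (a : Int) (t : List Int) :
    supOn g (a :: t) = max (g a) (supOn g t) := rfl

-- some element's running count reaches M while scanning l after prefix pre
def Reaches (pre l : List Int) (M : Nat) : Prop :=
  ∃ a x b, l = a ++ x :: b ∧ pre.count x + a.count x + 1 = M

theorem le_supOn (g : Int → Nat) {x : Int} {l : List Int} (h : x ∈ l) : g x ≤ supOn g l := by
  induction l with
  | nil => cases h
  | cons a t ih =>
    rcases List.mem_cons.mp h with rfl | h
    · exact le_max_left _ _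
    · exact le_trans (ih h) (le_max_right _ _)

theorem exists_supOn (g : Int → Nat) {l : List Int} (h : l ≠ []) : ∃ x ∈ l, supOn g l = g x := by
  induction l with
  | nil => exact absurd rfl h
  | cons a t ih =>
    cases t with
    | nil => exact ⟨a, List.mem_singleton.mpr rfl, by simp [supOn]⟩
    | cons b t' =>
      obtain ⟨x, hx, hs⟩ := ih (by simp)
      rcases max_choice (g a) (supOn g (b :: t')) with hm | hm
      · exact ⟨a, List.mem_cons_self, by rw [supOn_cons]; exact hm⟩
      · exact ⟨x, List.mem_cons_of_mem _ hx, by rw [supOn_cons, hm, hs]⟩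

theorem count_le_mc {x : Int} {l : List Int} (h : x ∈ l) : l.count x ≤ mc l :=
  le_supOn (fun y => l.count y) h

theorem count_append_singleton (l : List Int) (n x : Int) :
    (l ++ [n]).count x = l.count x + if x = n then 1 else 0 := by
  by_cases h : x = n <;> simp [List.count_append, h, List.count_eq_zero]

theorem one_le_mc {x : Int} {l : List Int} (h : x ∈ l) : 1 ≤ mc l :=
  le_trans (List.count_pos_iff.mpr h) (count_le_mc h)

theorem mc_append_singleton (l : List Int) (n : Int) :
    mc (l ++ [n]) = max (mc l) (l.count n + 1) := by
  apply le_antisymm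
  · obtain ⟨x, hx, hs⟩ := exists_supOn (fun y => (l ++ [n]).count y) (l := l ++ [n]) (by simp)
    show supOn _ _ ≤ _
    rw [hs]
    by_cases h : x = n
    · subst h; rw [count_append_singleton]; simp
    · have hxl : x ∈ l := by
        rcases List.mem_append.mp hx with h1 | h1
        · exact h1
        · simp at h1; exact absurd h1 h
      rw [count_append_singleton, if_neg h]
      exact le_max_of_le_left (by simpa using count_le_mc hxl)
  · apply max_le
    · cases l with
      | nil => simp [mc, supOn]
      | cons a t =>
        obtain ⟨x, hx, hs⟩ := exists_supOn (fun y => (a :: t).count y) (l := a :: t) (by simp)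
        calc mc (a :: t) = (a :: t).count x := hs
          _ ≤ ((a :: t) ++ [n]).count x := by rw [count_append_singleton]; omega
          _ ≤ mc ((a :: t) ++ [n]) := count_le_mc (List.mem_append_left _ hx)
    · have he : (l ++ [n]).count n = l.count n + 1 := by rw [count_append_singleton]; simp
      rw [← he]; exact count_le_mc (by simp)

theorem prefix_count_lt {l a b : List Int} {x : Int} (h : l = a ++ x :: b) :
    a.count x + 1 ≤ l.count x := by
  subst h; simp [List.count_append]

theorem reaches_cons {pre l : List Int} {a : Int} {M : Nat}
    (h : Reaches (pre ++ [a]) l M) : Reaches pre (a :: l) M := by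
  obtain ⟨u, x, v, hl, hc⟩ := h
  refine ⟨a :: u, x, v, by rw [hl, List.cons_append], ?_⟩
  simp only [List.count_append, List.count_cons, List.count_nil] at hc ⊢
  omega

theorem reaches_cons_elim {pre l : List Int} {a : Int} {M : Nat}
    (h : Reaches pre (a :: l) M) (hne : pre.count a + 1 ≠ M) : Reaches (pre ++ [a]) l M := by
  obtain ⟨u, x, v, hl, hc⟩ := h
  cases u with
  | nil =>
    simp only [List.nil_append, List.cons.injEq] at hl
    obtain ⟨rfl, rfl⟩ := hl
    simp [List.count_nil] at hc
    omega
  | cons b u' =>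
    simp only [List.cons_append, List.cons.injEq] at hl
    obtain ⟨rfl, rfl⟩ := hl
    refine ⟨u', x, v, rfl, ?_⟩
    simp only [List.count_append, List.count_cons, List.count_nil] at hc ⊢
    omega

theorem fr_of_reaches {M : Nat} (rest : List Int) :
    ∀ (l pre : List Int), Reaches pre l M → frAbs pre (l ++ rest) M = frAbs pre l M := by
  intro l
  induction l with
  | nil =>
    intro pre h
    obtain ⟨a, x, b, hl, _⟩ := h
    exact absurd hl.symm (by simp)
  | cons n t ih =>
    intro pre h
    by_cases hc : pre.count n + 1 = M
    · simp [frAbs, hc]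
    · simp only [List.cons_append, frAbs, if_neg hc]
      exact ih _ (reaches_cons_elim h hc)

theorem fr_of_not_reaches {M : Nat} (rest : List Int) :
    ∀ (l pre : List Int), ¬ Reaches pre l M → frAbs pre (l ++ rest) M = frAbs (pre ++ l) rest M := by
  intro l
  induction l with
  | nil => intro pre _; simp
  | cons n t ih =>
    intro pre h
    have hc : pre.count n + 1 ≠ M := fun hc => h ⟨[], n, t, rfl, by simpa using hc⟩
    have h' : ¬ Reaches (pre ++ [n]) t M := fun hr => h (reaches_cons hr)
    simp only [List.cons_append, frAbs, if_neg hc]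
    rw [ih _ h']
    simp

theorem reaches_of_count {x : Int} {M : Nat} :
    ∀ (l pre : List Int), pre.count x < M → M ≤ pre.count x + l.count x → Reaches pre l M := by
  intro l
  induction l with
  | nil => intro pre h1 h2; simp at h2; omega
  | cons a t ih =>
    intro pre h1 h2
    by_cases hc : pre.count a + 1 = M
    · exact ⟨[], a, t, rfl, by simpa using hc⟩
    · apply reaches_cons
      simp only [List.count_cons, beq_iff_eq] at h2
      by_cases hax : a = x
      · subst hax
        apply ih
        · rw [count_append_singleton, if_pos rfl]; omega
        · rw [count_append_singleton, if_pos rfl]; simp at h2; omega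
      · apply ih
        · rw [count_append_singleton, if_neg (Ne.symm hax)]; exact h1
        · rw [count_append_singleton, if_neg (Ne.symm hax)]
          simp [hax] at h2
          omega

theorem not_reaches_succ_mc (p : List Int) : ¬ Reaches [] p (mc p + 1) := by
  rintro ⟨a, x, b, hd, hcnt⟩
  have h1 := prefix_count_lt hd
  have h2 : x ∈ p := hd ▸ List.mem_append_right _ List.mem_cons_self
  have h3 := count_le_mc h2
  simp at hcnt
  omega

theorem aAbs_eq (t : List Int) : ∀ (p : List Int) (cur : Int), cur ∈ p →
    p.count cur = mc p → frAbs [] p (mc p) = cur →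
    aAbs p t cur = frAbs [] (p ++ t) (mc (p ++ t)) := by
  induction t with
  | nil => intro p cur _ _ h3; simpa [aAbs] using h3.symm
  | cons n t ih =>
    intro p cur h1 h2 h3
    have hmc1 : 1 ≤ mc p := one_le_mc h1
    have hstep : aAbs p (n :: t) cur
        = aAbs (p ++ [n]) t (if (p ++ [n]).count n > (p ++ [n]).count cur then n else cur) := rfl
    by_cases hn : p.count n = mc p
    · -- n's count reaches a new maximum: current becomes n
      have hcn : (p ++ [n]).count n = mc p + 1 := by rw [count_append_singleton, if_pos rfl]; omega
      have hcur' : (if (p ++ [n]).count n > (p ++ [n]).count cur then n else cur) = n := by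
        by_cases he : cur = n
        · subst he; simp
        · have : (p ++ [n]).count cur = mc p := by
            rw [count_append_singleton, if_neg he]; omega
          rw [this, hcn, if_pos (by omega)]
      have hmc' : mc (p ++ [n]) = mc p + 1 := by
        rw [mc_append_singleton, hn]; omega
      have hfr : frAbs [] (p ++ [n]) (mc (p ++ [n])) = n := by
        rw [hmc', fr_of_not_reaches [n] p [] (not_reaches_succ_mc p)]
        simp [frAbs, hn]
      rw [hstep, hcur', ih (p ++ [n]) n (by simp) (by rw [hcn, hmc']) hfr]
      simp
    · -- n stays below the maximum: everything is preserved
      have hlt : p.count n < mc p := by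
        by_cases hm : n ∈ p
        · exact lt_of_le_of_ne (count_le_mc hm) hn
        · rw [List.count_eq_zero.mpr hm]; omega
      have he : cur ≠ n := fun e => hn (e ▸ h2)
      have hcc : (p ++ [n]).count cur = mc p := by rw [count_append_singleton, if_neg he]; omega
      have hcn : (p ++ [n]).count n = p.count n + 1 := by rw [count_append_singleton, if_pos rfl]
      have hcur' : (if (p ++ [n]).count n > (p ++ [n]).count cur then n else cur) = cur := by
        rw [hcc, hcn, if_neg (by omega)]
      have hmc' : mc (p ++ [n]) = mc p := by rw [mc_append_singleton]; omega
      have hre : Reaches [] p (mc p) := by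
        apply reaches_of_count (x := cur)
        · simpa using hmc1
        · simp; omega
      have hfr : frAbs [] (p ++ [n]) (mc (p ++ [n])) = cur := by
        rw [hmc', fr_of_reaches [n] p [] hre, h3]
      rw [hstep, hcur', ih (p ++ [n]) cur (List.mem_append_left _ h1) (by rw [hcc, hmc']) hfr]
      simp

theorem listenLoopA_eq (t : List Int) : ∀ (p : List Int) (d : PySem.Dict Int Int) (cur : Int),
    (∀ x, d.getD x 0 = (p.count x : Int)) → (∀ x, d.contains x = decide (x ∈ p)) →
    listenLoopA t d cur = aAbs p t cur := by
  induction t with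
  | nil => intro p d cur _ _; rfl
  | cons n t ih =>
    intro p d cur hd hc
    have hdict : (if d.contains n then d.insert n (d.getD n 0 + 1) else d.insert n 1)
        = d.insert n (d.getD n 0 + 1) := by
      by_cases hm : n ∈ p
      · rw [hc n, if_pos (by simpa using hm)]
      · rw [hc n, if_neg (by simpa using hm), hd n, List.count_eq_zero.mpr hm]
        norm_num
    have hd2 : ∀ x, (d.insert n (d.getD n 0 + 1)).getD x 0 = (((p ++ [n]).count x : Nat) : Int) := by
      intro x
      rw [PySem.Dict.getD_insert, count_append_singleton]
      by_cases hx : x = n <;> simp [hx, hd]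
    have hc2 : ∀ x, (d.insert n (d.getD n 0 + 1)).contains x = decide (x ∈ p ++ [n]) := by
      intro x
      rw [PySem.Dict.contains_insert, hc x]
      by_cases hx : x = n <;> simp [hx]
    have hcond : ((d.insert n (d.getD n 0 + 1)).getD n 0 > (d.insert n (d.getD n 0 + 1)).getD cur 0)
        = ((p ++ [n]).count n > (p ++ [n]).count cur) := by
      rw [hd2 n, hd2 cur]
      simp only [gt_iff_lt, eq_iff_iff]
      exact ⟨fun h => by exact_mod_cast h, fun h => by exact_mod_cast h⟩
    show listenLoopA (n :: t) d cur = aAbs p (n :: t) cur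
    simp only [listenLoopA, aAbs, hdict, hcond]
    exact ih (p ++ [n]) _ _ hd2 hc2

theorem listenFindB_eq (t : List Int) : ∀ (pre : List Int) (r : PySem.Dict Int Int) (M : Nat),
    (∀ x, r.getD x 0 = (pre.count x : Int)) →
    listenFindB t r (M : Int) = frAbs pre t M := by
  induction t with
  | nil => intro pre r M _; rfl
  | cons n t ih =>
    intro pre r M hr
    have hr2 : ∀ x, (r.insert n (r.getD n 0 + 1)).getD x 0 = (((pre ++ [n]).count x : Nat) : Int) := by
      intro x
      rw [PySem.Dict.getD_insert, count_append_singleton]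
      by_cases hx : x = n <;> simp [hx, hr]
    have hcond : ((r.insert n (r.getD n 0 + 1)).getD n 0 = (M : Int))
        = (pre.count n + 1 = M) := by
      rw [hr2 n, count_append_singleton, if_pos rfl]
      simp only [eq_iff_iff]
      exact ⟨fun h => by exact_mod_cast h, fun h => by exact_mod_cast congrArg (Nat.cast (R := Int)) h⟩
    show listenFindB (n :: t) r (M : Int) = frAbs pre (n :: t) M
    simp only [listenFindB, frAbs, hcond]
    split
    · rfl
    · exact ih (pre ++ [n]) _ M hr2

theorem m_eq_mc (nodes : List Int) (h : nodes ≠ []) :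
    ((PySem.List.max? (nodes.foldl (fun d x => d.insert x (d.getD x 0 + 1)) PySem.Dict.empty).values
      (fun y => y)).getD 0) = (mc nodes : Int) := by
  rw [PySem.Dict.foldl_insert_getD_add_one_eq_counter]
  have hv : (PySem.Dict.counter nodes).values
      = (PySem.Set.ofList nodes).map (fun k => ((nodes.count k : Nat) : Int)) := by
    show (PySem.Dict.counter nodes).items.map (·.2) = _
    rw [PySem.Dict.items_counter]
    simp [List.map_map, Function.comp]
  rw [hv]
  have hne : (PySem.Set.ofList nodes).map (fun k => ((nodes.count k : Nat) : Int)) ≠ [] := by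
    cases nodes with
    | nil => exact absurd rfl h
    | cons a t =>
      have ha : a ∈ PySem.Set.ofList (a :: t) := (PySem.Set.mem_ofList _ _).mpr List.mem_cons_self
      exact fun he => by simpa [he] using List.mem_map_of_mem (f := fun k => (((a :: t).count k : Nat) : Int)) ha
  cases hm : PySem.List.max? ((PySem.Set.ofList nodes).map (fun k => ((nodes.count k : Nat) : Int))) (fun y => y) with
  | none => rw [PySem.List.max?_eq_none_iff] at hm; exact absurd hm hne
  | some m =>
    have hmem := PySem.List.max?_mem hm
    have hmax := PySem.List.max?_isMax hm
    obtain ⟨k, hk, rfl⟩ := List.mem_map.mp hmem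
    have hkn : k ∈ nodes := (PySem.Set.mem_ofList _ _).mp hk
    have h1 : nodes.count k ≤ mc nodes := count_le_mc hkn
    obtain ⟨x, hx, hs⟩ := exists_supOn (fun y => nodes.count y) h
    have hxv : ((nodes.count x : Nat) : Int)
        ∈ (PySem.Set.ofList nodes).map (fun k => ((nodes.count k : Nat) : Int)) :=
      List.mem_map_of_mem ((PySem.Set.mem_ofList _ _).mpr hx)
    have h2 : ((nodes.count x : Nat) : Int) ≤ ((nodes.count k : Nat) : Int) := hmax _ hxv
    have h3 : mc nodes = nodes.count x := hs
    show ((nodes.count k : Nat) : Int) = (mc nodes : Int)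
    rw [h3]
    omega

-- ===== VERDICT (by name: the statement is the Claim_ definition above) =====
theorem listen_spec : Claim_equal_listen := by
  intro nodes _ hpre
  show listen nodes = listen_alt nodes
  cases nodes with
  | nil => exact absurd rfl hpre
  | cons h t =>
    have hm := m_eq_mc (h :: t) (by simp)
    have hB : listen_alt (h :: t) = frAbs [] (h :: t) (mc (h :: t)) := by
      show listenFindB (h :: t) PySem.Dict.empty _ = _
      rw [hm]
      exact listenFindB_eq (h :: t) [] PySem.Dict.empty (mc (h :: t))
        (fun x => by simp [PySem.Dict.getD_empty])
    have hd0 : ∀ x, (PySem.Dict.empty.insert h 1).getD x 0 = (([h].count x : Nat) : Int) := by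
      intro x
      rw [PySem.Dict.getD_insert]
      by_cases hx : x = h
      · simp [hx]
      · rw [if_neg hx, PySem.Dict.getD_empty, List.count_eq_zero.mpr (by simp [hx] : x ∉ [h])]
        simp
    have hc0 : ∀ x, (PySem.Dict.empty.insert h 1).contains x = decide (x ∈ [h]) := by
      intro x
      rw [PySem.Dict.contains_insert]
      by_cases hx : x = h <;> simp [hx]
    have hmc1 : mc [h] = 1 := by simp [mc, supOn]
    have hA : listen (h :: t) = aAbs [h] t h := listenLoopA_eq t [h] _ h hd0 hc0
    rw [hB, hA, aAbs_eq t [h] h (by simp) (by simp [hmc1]) (by simp [frAbs, hmc1])]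
    simp
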